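-- pv_equiv track=rewrite | github.com/alo1719/LeetCode | OA/SF.perfect-pairs.py | find_perfect_pairs
-- ===== SOURCE A (Python) =====
-- def find_perfect_pairs(nums):
--     n = len(nums)
--     for i in range(n):
--         nums[i] = abs(nums[i])
--     nums.sort()
--     ans = 0
--     right = -1
--     for left in range(n):
--         while right+1 < n and nums[right+1] <= 2*nums[left]:
--             right += 1
--         ans += right - left
--     return ans
-- ===== SOURCE B (Python) =====
-- def _bisect_right(a, x):
--     lo, hi = 0, len(a)
--     while lo < hi:
--         mid = (lo + hi) // 2
--         if a[mid] <= x: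
--             lo = mid + 1
--         else:
--             hi = mid
--     return lo
--
-- def find_perfect_pairs(nums):
--     for i in range(len(nums)):
--         nums[i] = abs(nums[i])
--     nums.sort()
--     ans = 0
--     for i, x in enumerate(nums):
--         ans += _bisect_right(nums, 2 * x) - i - 1
--     return ans
-- ===== Notes on version B (the rewrite author's own statement) =====
-- stated objective: alternative
-- what changed: Replaces A's persistent two-pointer sweep (a while-loop advancing a shared right index across iterations) with an independent hand-written binary search (bisect_right) per element over the sorted array; the in-place abs+sort mutation is kept identical.
import Mathlib
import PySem

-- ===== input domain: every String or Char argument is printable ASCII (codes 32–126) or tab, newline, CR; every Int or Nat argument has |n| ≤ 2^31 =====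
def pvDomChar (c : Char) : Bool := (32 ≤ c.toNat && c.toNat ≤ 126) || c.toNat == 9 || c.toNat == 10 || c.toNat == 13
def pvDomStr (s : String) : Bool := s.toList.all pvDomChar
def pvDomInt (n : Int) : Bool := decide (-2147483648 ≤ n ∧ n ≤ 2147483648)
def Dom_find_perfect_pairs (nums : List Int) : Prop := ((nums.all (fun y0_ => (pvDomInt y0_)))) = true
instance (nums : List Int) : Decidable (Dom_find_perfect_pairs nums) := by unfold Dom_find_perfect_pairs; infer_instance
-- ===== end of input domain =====

-- B replaces A's persistent two-pointer sweep with a per-element hand-written binary search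
-- (bisect_right) over the sorted array: an alternative counting pass of the same O(n log n) cost.
-- Both A and B mutate the argument list in place identically (abs of each element, then sort);
-- the equivalence proved here is about the return value.

-- ===== PORT A =====
-- the while-loop 'while right+1 < n and nums[right+1] <= 2*nums[left]: right += 1';
-- the index right+1 is guarded by right+1 < n and (in every reachable state) 0 ≤ right+1,
-- so pyGetD is exact there
-- structural recursion on a fuel counter ((n - right).toNat at the call site bounds the number
-- of iterations, since right increases towards n), a totality device only
def pvAdvance (xs : List Int) (n bound : Int) : Nat → Int → Int
  | 0, right => right
  | fuel + 1, right =>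
    if right + 1 < n ∧ PySem.List.pyGetD xs (right + 1) 0 ≤ bound then
      pvAdvance xs n bound fuel (right + 1)
    else right

def find_perfect_pairs (nums : List Int) : Int :=
  let n : Int := nums.length
  let nums1 := nums.map (fun v => |v|)            -- for i in range(n): nums[i] = abs(nums[i])
  let nums2 := PySem.List.sorted nums1 (fun v => v)  -- nums.sort()
  ((PySem.List.pyRange 0 n 1).foldl
    (fun (st : Int × Int) left =>
      let right := pvAdvance nums2 n (2 * PySem.List.pyGetD nums2 left 0) (n - st.2).toNat st.2
      (st.1 + (right - left), right)) (0, -1)).1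

-- ===== PORT B =====
-- _bisect_right's while-loop; 0 ≤ lo ≤ mid < hi ≤ len in every reachable state, so pyGetD is exact
-- structural recursion on a fuel counter (hi - lo shrinks by at least 1 per iteration, so
-- a.length iterations always suffice), a totality device only
def pvBisectLoop (a : List Int) (x : Int) : Nat → Int → Int → Int
  | 0, lo, _ => lo
  | fuel + 1, lo, hi =>
    if lo < hi then
      let mid := PySem.Int.floordiv (lo + hi) 2
      if PySem.List.pyGetD a mid 0 ≤ x then pvBisectLoop a x fuel (mid + 1) hi
      else pvBisectLoop a x fuel lo mid
    else lo

def pvBisectRight (a : List Int) (x : Int) : Int := pvBisectLoop a x a.length 0 a.length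

def find_perfect_pairs_alt (nums : List Int) : Int :=
  let nums1 := nums.map (fun v => |v|)
  let nums2 := PySem.List.sorted nums1 (fun v => v)
  (PySem.List.enumerate nums2).foldl
    (fun ans p => ans + (pvBisectRight nums2 (2 * p.2) - p.1 - 1)) 0

-- ===== PRECONDITION & SPEC =====
def Spec_find_perfect_pairs (nums : List Int) (out : Int) : Prop := out = find_perfect_pairs_alt nums
instance (nums : List Int) (out : Int) : Decidable (Spec_find_perfect_pairs nums out) := by unfold Spec_find_perfect_pairs; infer_instance

-- ===== CLAIM (what is proved, stated in full; the proofs are below) =====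
def Claim_equal_find_perfect_pairs : Prop := ∀ (nums : List Int), Dom_find_perfect_pairs nums → Spec_find_perfect_pairs nums (find_perfect_pairs nums)

-- ===== LEMMAS AND PROOFS =====

-- number of elements ≤ b, as an Int: the common value both loops compute around
def pvCnt (ys : List Int) (b : Int) : Int := (ys.countP (fun a => decide (a ≤ b)) : Int)

theorem pv_prefix (b : Int) (ys : List Int) (hs : List.Pairwise (· ≤ ·) ys) :
    ∀ i (h : i < ys.length), (ys[i] ≤ b ↔ i < ys.countP (fun a => decide (a ≤ b))) := by
  induction ys with
  | nil => intro i h; simp at h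
  | cons y t ih =>
    have hy : ∀ z ∈ t, y ≤ z := (List.pairwise_cons.mp hs).1
    have ht := (List.pairwise_cons.mp hs).2
    intro i hi
    cases i with
    | zero =>
      by_cases hyb : y ≤ b
      · simp [hyb]
      · have h0 : t.countP (fun a => decide (a ≤ b)) = 0 := by
          rw [List.countP_eq_zero]
          intro z hz
          have := hy z hz
          simp; omega
        simp [hyb, h0]
    | succ i =>
      have hi' : i < t.length := by simpa using hi
      by_cases hyb : y ≤ b
      · have := ih ht i hi'
        simp [hyb]
        simpa using this
      · have h0 : t.countP (fun a => decide (a ≤ b)) = 0 := by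
          rw [List.countP_eq_zero]
          intro z hz
          have := hy z hz
          simp; omega
        have hti : ¬ t[i] ≤ b := by
          have := hy t[i] (t.getElem_mem hi')
          omega
        simp [hyb, h0]
        simpa using hti

theorem pv_cnt_mono (ys : List Int) {b1 b2 : Int} (h : b1 ≤ b2) :
    pvCnt ys b1 ≤ pvCnt ys b2 := by
  unfold pvCnt
  have := List.countP_mono_left (l := ys)
    (p := fun a => decide (a ≤ b1)) (q := fun a => decide (a ≤ b2))
    (by intro x _ hx; simp at hx ⊢; omega)
  exact_mod_cast this

theorem pv_sorted_getD_mono (ys : List Int) (hs : List.Pairwise (· ≤ ·) ys)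
    {i j : Nat} (hij : i ≤ j) (hj : j < ys.length) :
    ys.getD i 0 ≤ ys.getD j 0 := by
  rcases Nat.lt_or_ge i j with hlt | hge
  · have := List.pairwise_iff_getElem.mp hs i j (by omega) hj hlt
    rw [List.getD_eq_getElem ys 0 (by omega), List.getD_eq_getElem ys 0 hj]
    exact this
  · have : i = j := by omega
    subst this; exact le_refl _

theorem pv_cnt_nonneg (ys : List Int) (b : Int) : 0 ≤ pvCnt ys b := by
  unfold pvCnt; positivity

theorem pv_cnt_le_len (ys : List Int) (b : Int) : pvCnt ys b ≤ ys.length := by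
  unfold pvCnt
  exact_mod_cast List.countP_le_length

theorem pv_advance_eq (ys : List Int) (b : Int) (hs : List.Pairwise (· ≤ ·) ys) :
    ∀ (fuel : Nat) (r : Int), -1 ≤ r → r ≤ pvCnt ys b - 1 →
      (pvCnt ys b - 1 - r).toNat ≤ fuel →
      pvAdvance ys (ys.length) b fuel r = pvCnt ys b - 1 := by
  intro fuel
  induction fuel with
  | zero =>
    intro r h1 h2 hk
    have hr : r = pvCnt ys b - 1 := by omega
    simp [pvAdvance, hr]
  | succ fuel ih =>
    intro r h1 h2 hk
    by_cases hr : r = pvCnt ys b - 1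
    · subst hr
      rw [pvAdvance, if_neg]
      rintro ⟨hlt, hle⟩
      have h0 : (0:Int) ≤ pvCnt ys b - 1 + 1 := by
        have := pv_cnt_nonneg ys b; omega
      rw [PySem.List.pyGetD_eq_getElem _ _ h0 hlt] at hle
      have := (pv_prefix b ys hs _ (by omega)).mp hle
      unfold pvCnt at *
      omega
    · have hcl := pv_cnt_le_len ys b
      have hlt : r + 1 < (ys.length : Int) := by omega
      have h0 : (0:Int) ≤ r + 1 := by omega
      have hidx : (r + 1).toNat < ys.length := by omega
      have hle : ys[(r+1).toNat] ≤ b := by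
        apply (pv_prefix b ys hs _ hidx).mpr
        unfold pvCnt at h2 hr
        omega
      rw [pvAdvance, if_pos ⟨hlt, by rw [PySem.List.pyGetD_eq_getElem _ _ h0 hlt]; exact hle⟩]
      exact ih (r + 1) (by omega) (by omega) (by omega)

theorem pv_bisect_loop_eq (ys : List Int) (b : Int) (hs : List.Pairwise (· ≤ ·) ys) :
    ∀ (fuel : Nat) (lo hi : Int), 0 ≤ lo → lo ≤ pvCnt ys b → pvCnt ys b ≤ hi →
      hi ≤ (ys.length : Int) → (hi - lo).toNat ≤ fuel →
      pvBisectLoop ys b fuel lo hi = pvCnt ys b := by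
  intro fuel
  induction fuel with
  | zero =>
    intro lo hi h0 hlo hhi hlen hk
    have : lo = pvCnt ys b := by omega
    simp [pvBisectLoop, this]
  | succ fuel ih =>
    intro lo hi h0 hlo hhi hlen hk
    rw [pvBisectLoop]
    by_cases hcond : lo < hi
    · rw [if_pos hcond]
      have hmid : PySem.Int.floordiv (lo + hi) 2 = (lo + hi) / 2 := by
        simp only [PySem.Int.floordiv]
        rw [Int.fdiv_eq_ediv]; simp
      set mid := PySem.Int.floordiv (lo + hi) 2 with hmiddef
      have hm1 : lo ≤ mid := by rw [hmid]; omega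
      have hm2 : mid < hi := by rw [hmid]; omega
      have hmn : mid < (ys.length : Int) := by omega
      have hm0 : (0:Int) ≤ mid := by omega
      have hg : PySem.List.pyGetD ys mid 0 = ys[mid.toNat] :=
        PySem.List.pyGetD_eq_getElem _ _ hm0 hmn
      by_cases hc : ys[mid.toNat] ≤ b
      · rw [if_pos (by rw [hg]; exact hc)]
        have := (pv_prefix b ys hs _ (by omega)).mp hc
        have hmc : mid + 1 ≤ pvCnt ys b := by unfold pvCnt; omega
        exact ih (mid + 1) hi (by omega) hmc hhi hlen (by omega)
      · rw [if_neg (by rw [hg]; exact hc)]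
        have hmc : pvCnt ys b ≤ mid := by
          by_contra hcon
          have hmt : mid.toNat < ys.length := by omega
          exact hc ((pv_prefix b ys hs mid.toNat hmt).mpr (by unfold pvCnt at hcon; omega))
        exact ih lo mid h0 hlo hmc (by omega) (by omega)
    · rw [if_neg hcond]
      omega

theorem pv_bisectRight_eq (ys : List Int) (b : Int) (hs : List.Pairwise (· ≤ ·) ys) :
    pvBisectRight ys b = pvCnt ys b := by
  unfold pvBisectRight
  exact pv_bisect_loop_eq ys b hs ys.length 0 (ys.length)
    le_rfl (pv_cnt_nonneg ys b) (pv_cnt_le_len ys b) le_rfl (by omega)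

theorem pv_enum (ys : List Int) :
    ∀ s : Int, PySem.List.enumerate ys s
      = (List.range ys.length).map (fun (i : Nat) => (s + (i : Int), ys.getD i 0)) := by
  induction ys with
  | nil => intro s; simp [PySem.List.enumerate]
  | cons y t ih =>
    intro s
    rw [PySem.List.enumerate_cons, ih (s + 1)]
    simp only [List.length_cons, List.range_succ_eq_map, List.map_cons, List.map_map]
    congr 1
    · simp
    · apply List.map_congr_left
      intro i _
      simp only [Function.comp_apply, Nat.succ_eq_add_one, List.getD_cons_succ, Prod.mk.injEq]
      refine ⟨by push_cast; ring, trivial⟩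

theorem pv_loop (ys : List Int) (hs : List.Pairwise (· ≤ ·) ys) :
    ∀ (ks : List Nat), (∀ i ∈ ks, i < ys.length) → List.Pairwise (· ≤ ·) ks →
    ∀ (ans r : Int), -1 ≤ r → (∀ i ∈ ks, r ≤ pvCnt ys (2 * ys.getD i 0) - 1) →
    (ks.foldl (fun (st : Int × Int) i =>
        (st.1 + (pvAdvance ys (ys.length) (2 * ys.getD i 0) (((ys.length : Int)) - st.2).toNat st.2 - (i : Int)),
         pvAdvance ys (ys.length) (2 * ys.getD i 0) (((ys.length : Int)) - st.2).toNat st.2)) (ans, r)).1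
      = ks.foldl (fun a i => a + (pvCnt ys (2 * ys.getD i 0) - (i : Int) - 1)) ans := by
  intro ks
  induction ks with
  | nil => intro _ _ ans r _ _; simp
  | cons i ks' ih =>
    intro hmem hpw ans r hr hbnd
    have hi : i < ys.length := hmem i (List.mem_cons_self ..)
    have hadv : pvAdvance ys (ys.length) (2 * ys.getD i 0) (((ys.length : Int)) - r).toNat r
        = pvCnt ys (2 * ys.getD i 0) - 1 := by
      have hcl := pv_cnt_le_len ys (2 * ys.getD i 0)
      have hb := hbnd i (List.mem_cons_self ..)
      exact pv_advance_eq ys _ hs _ r hr hb (by omega)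
    simp only [List.foldl_cons, hadv]
    have step : ans + (pvCnt ys (2 * ys.getD i 0) - 1 - (i : Int))
        = ans + (pvCnt ys (2 * ys.getD i 0) - (i : Int) - 1) := by ring
    rw [step]
    apply ih (fun j hj => hmem j (List.mem_cons_of_mem _ hj))
      ((List.pairwise_cons.mp hpw).2) _ _
      (by have := pv_cnt_nonneg ys (2 * ys.getD i 0); omega)
    intro j hj
    have hij : i ≤ j := (List.pairwise_cons.mp hpw).1 j hj
    have hjl : j < ys.length := hmem j (List.mem_cons_of_mem _ hj)
    have := pv_sorted_getD_mono ys hs hij hjl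
    have := pv_cnt_mono ys (b1 := 2 * ys.getD i 0) (b2 := 2 * ys.getD j 0) (by omega)
    omega

-- ===== VERDICT (by name: the statement is the Claim_ definition above) =====
theorem find_perfect_pairs_spec : Claim_equal_find_perfect_pairs := by
  intro nums _
  simp only [Spec_find_perfect_pairs, find_perfect_pairs, find_perfect_pairs_alt]
  set ys := PySem.List.sorted (nums.map (fun v => |v|)) (fun v => v) with hys
  have hs : List.Pairwise (· ≤ ·) ys := by
    have := PySem.List.sorted_pairwise (nums.map (fun v => |v|)) (fun v => v)
    simpa using this
  have hlen : ys.length = nums.length := by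
    rw [hys, PySem.List.length_sorted, List.length_map]
  -- A side: fold over pyRange → fold over List.range
  rw [show ((nums.length : Int)) = ((ys.length : Int)) by rw [hlen]]
  rw [PySem.List.pyRange_zero_natCast, List.foldl_map]
  -- B side: fold over enumerate → fold over List.range
  rw [pv_enum ys 0, List.foldl_map]
  simp only [PySem.List.pyGetD_natCast, zero_add]
  have hbis : (fun (a : Int) (i : Nat) => a + (pvBisectRight ys (2 * ys.getD i 0) - (i : Int) - 1))
      = (fun (a : Int) (i : Nat) => a + (pvCnt ys (2 * ys.getD i 0) - (i : Int) - 1)) := by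
    funext a i; rw [pv_bisectRight_eq ys _ hs]
  rw [hbis]
  apply pv_loop ys hs (List.range ys.length)
    (by intro i hi; exact List.mem_range.mp hi)
    ((List.pairwise_lt_range).imp (fun h => le_of_lt h))
    0 (-1) (by omega)
  intro i _
  have := pv_cnt_nonneg ys (2 * ys.getD i 0)
  omega
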